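-- pv_equiv track=rewrite | github.com/BME-MIT-IET/iet-hf-2022-do-the-thing | third_party/namanager/namanager/util.py | convert_words_to_case
-- ===== SOURCE A (Python) =====
-- def convert_word_to_case(word, case):
--     """
--     Camel case is insensible for single word.
--
--     User can convert all words to pascal case
--     and then change first letter to lowercase
--     if one want to convert words to camel case.
--     """
--
--     if case == 'upper_case':
--         word = word.upper()
--     elif case == 'lower_case':
--         word = word.lower()
--     elif case == 'pascal_case':
--         word = word[0].upper() + word[1:].lower()
--     else:
--         raise KeyError(
--             "key {0} is not found in the set of existing keys.".format(case))
--
--     return word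
--
-- def convert_words_to_case(words, case):
--     """
--     This function assuming that
--     all words are well separated and
--     not included empty string:
--         Ok:
--             ['_*&', 'Http', 'protocol', '#$%']
--         Wrong:
--             ['_*&h', 'ttp', 'protocol', '#$%']
--     """
--
--     converted_words = []
--
--     if case == 'camel_case':
--         first_word_occured = False
--         for w in words:
--             word = convert_word_to_case(w, 'pascal_case')
--             if not first_word_occured and word[0].isalpha():
--                 word = word[0].lower() + word[1:]
--                 first_word_occured = True
--             converted_words.append(word)
--
--     elif case in ['upper_case', 'lower_case', 'pascal_case']:
--         for w in words:
--             converted_words.append(convert_word_to_case(w, case))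
--
--     else:
--         raise KeyError(
--             "key {0} is not found in the set of existing keys.".format(case))
--
--     return converted_words
-- ===== SOURCE B (Python) =====
-- def _pascal(w):
--     return w[0].upper() + w[1:].lower()
--
-- def convert_words_to_case(words, case):
--     if case in ('upper_case', 'lower_case', 'pascal_case'):
--         f = {'upper_case': str.upper,
--              'lower_case': str.lower,
--              'pascal_case': _pascal}[case]
--         return [f(w) for w in words]
--     if case != 'camel_case':
--         raise KeyError(
--             "key {0} is not found in the set of existing keys.".format(case))
--     # camel: split the list at the first word whose initial character is
--     # alphabetic; pascal-case both sides, fully lowercase that pivot word.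
--     i = 0
--     while i < len(words) and not words[i][0].isalpha():
--         i += 1
--     if i == len(words):
--         return [_pascal(w) for w in words]
--     head = words[i].lower()
--     return [_pascal(w) for w in words[:i]] + [head] + [_pascal(w) for w in words[i + 1:]]
-- ===== Notes on version B (the rewrite author's own statement) =====
-- stated objective: alternative
-- what changed: camel_case is rebuilt as a split-at-pivot algorithm: scan for the index of the first word whose initial character is alphabetic, pascal-case the words on each side via list slices, and produce the pivot word with a plain word.lower() (instead of A's pascal-then-lowercase-first-letter fix inside a flag-carrying loop); the other cases dispatch through a dict of per-case string functions instead of per-word if/elif chains.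
import Mathlib
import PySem

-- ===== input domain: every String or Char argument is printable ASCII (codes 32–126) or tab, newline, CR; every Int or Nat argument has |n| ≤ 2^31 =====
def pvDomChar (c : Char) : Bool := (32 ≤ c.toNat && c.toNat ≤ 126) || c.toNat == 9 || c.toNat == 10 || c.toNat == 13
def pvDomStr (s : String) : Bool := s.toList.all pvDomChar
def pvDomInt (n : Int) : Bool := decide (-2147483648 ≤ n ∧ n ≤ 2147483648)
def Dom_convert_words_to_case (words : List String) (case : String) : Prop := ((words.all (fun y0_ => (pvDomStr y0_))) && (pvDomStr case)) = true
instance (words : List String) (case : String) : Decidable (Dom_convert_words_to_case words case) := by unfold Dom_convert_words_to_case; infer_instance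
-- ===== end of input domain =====

-- B replaces A's single camel pass with a flag by a split-at-pivot algorithm: scan for the first word
-- with an alphabetic initial, pascal-case each side of it, and fully lowercase that pivot word
-- (word.lower() instead of A's pascal-then-lower-first); alternative decomposition, same cost.


-- ===== PORT A =====
-- word[0].upper() + word[1:].lower()  (word[0] on "" raises IndexError — excluded by Pre_; the getD default never fires there)
def pvPascalA (w : String) : String :=
  String.ofList (PySem.Chars.upper [((PySem.Str.pyGet? w 0).getD ' ')] ++
             PySem.Chars.lower ((PySem.Str.slice w (some 1) none).toList))

-- convert_word_to_case; the unknown-case KeyError is excluded by Pre_ (the port returns word unchanged there)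
def pvConvertWordA (word : String) (case : String) : String :=
  if case = "upper_case" then PySem.Str.upper word
  else if case = "lower_case" then PySem.Str.lower word
  else if case = "pascal_case" then pvPascalA word
  else word

-- word[0].lower() + word[1:]
def pvLowerFirstA (word : String) : String :=
  String.ofList (PySem.Chars.lower [((PySem.Str.pyGet? word 0).getD ' ')] ++
             (PySem.Str.slice word (some 1) none).toList)

-- A's camel loop: structural recursion over words carrying the first_word_occured flag
def pvCamelLoopA (words : List String) (flag : Bool) : List String :=
  match words with
  | [] => []
  | w :: ws =>
      let word := pvConvertWordA w "pascal_case"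
      if !flag && PySem.Chars.isalpha ((PySem.Str.pyGet? word 0).getD ' ') then
        pvLowerFirstA word :: pvCamelLoopA ws true
      else
        word :: pvCamelLoopA ws flag

def convert_words_to_case (words : List String) (case : String) : List String :=
  if case = "camel_case" then
    pvCamelLoopA words false
  else if case = "upper_case" ∨ case = "lower_case" ∨ case = "pascal_case" then
    words.map (fun w => pvConvertWordA w case)
  else
    words  -- KeyError in Python: excluded by Pre_

-- ===== PORT B =====
def pvPascalB (w : String) : String :=
  String.ofList (PySem.Chars.upper [((PySem.Str.pyGet? w 0).getD ' ')] ++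
             PySem.Chars.lower ((PySem.Str.slice w (some 1) none).toList))

-- words[i][0].isalpha() tested on the ORIGINAL word
def pvFirstAlphaW (w : String) : Bool :=
  PySem.Chars.isalpha ((PySem.Str.pyGet? w 0).getD ' ')

-- B's while-loop + slices words[:i] / words[i] / words[i+1:], as a structural split
def pvSplitAtAlpha (words : List String) : List String × Option (String × List String) :=
  match words with
  | [] => ([], none)
  | w :: ws =>
      if pvFirstAlphaW w then ([], some (w, ws))
      else
        let r := pvSplitAtAlpha ws
        (w :: r.1, r.2)

def convert_words_to_case_alt (words : List String) (case : String) : List String :=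
  if case = "upper_case" ∨ case = "lower_case" ∨ case = "pascal_case" then
    words.map (fun w =>
      if case = "upper_case" then PySem.Str.upper w
      else if case = "lower_case" then PySem.Str.lower w
      else pvPascalB w)
  else if case = "camel_case" then
    match pvSplitAtAlpha words with
    | (_, none) => words.map pvPascalB
    | (pre, some (h, t)) => pre.map pvPascalB ++ [PySem.Str.lower h] ++ t.map pvPascalB
  else
    words  -- KeyError in Python: excluded by Pre_

-- ===== PRECONDITION & SPEC =====
-- Pre_ excludes exactly the inputs where Python A raises: an unknown case string (KeyError),
-- and an empty-string word under pascal_case/camel_case (word[0] raises IndexError).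
def Pre_convert_words_to_case (words : List String) (case : String) : Prop :=
  (case = "upper_case" ∨ case = "lower_case") ∨
  ((case = "pascal_case" ∨ case = "camel_case") ∧ ∀ w ∈ words, w ≠ "")
instance (words : List String) (case : String) : Decidable (Pre_convert_words_to_case words case) := by
  unfold Pre_convert_words_to_case; infer_instance

def pvWitness_convert_words_to_case : List String × String := (["Http", "protocol"], "camel_case")

def Spec_convert_words_to_case (words : List String) (case : String) (out : List String) : Prop := out = convert_words_to_case_alt words case
instance (words : List String) (case : String) (out : List String) : Decidable (Spec_convert_words_to_case words case out) := by unfold Spec_convert_words_to_case; infer_instance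

-- ===== CLAIM (what is proved, stated in full; the proofs are below) =====
def Claim_equal_convert_words_to_case : Prop := ∀ (words : List String) (case : String), Dom_convert_words_to_case words case → Pre_convert_words_to_case words case → Spec_convert_words_to_case words case (convert_words_to_case words case)

-- ===== LEMMAS AND PROOFS =====
theorem toNat_ofNat_small (n : Nat) (h : n < 0xd800) : (Char.ofNat n).toNat = n := by
  have hv : n.isValidChar := Or.inl h
  rw [Char.ofNat, dif_pos hv]
  exact Char.toNat_ofNatAux hv

theorem charLe_iff (a c : Char) : (a ≤ c) ↔ a.toNat ≤ c.toNat := by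
  constructor <;> exact fun h => h

theorem pvLowerChar_upperChar (c : Char) :
    PySem.Chars.lowerChar (PySem.Chars.upperChar c) = PySem.Chars.lowerChar c := by
  unfold PySem.Chars.lowerChar PySem.Chars.upperChar PySem.Chars.islower PySem.Chars.isupper
  by_cases hl : 'a' ≤ c ∧ c ≤ 'z'
  · have h1 : 97 ≤ c.toNat := (charLe_iff _ _).1 hl.1
    have h2 : c.toNat ≤ 122 := (charLe_iff _ _).1 hl.2
    have ht : (Char.ofNat (c.toNat - 32)).toNat = c.toNat - 32 := toNat_ofNat_small _ (by omega)
    have hA : 'A' ≤ Char.ofNat (c.toNat - 32) := (charLe_iff _ _).2 (by rw [ht]; show 65 ≤ _; omega)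
    have hZ : Char.ofNat (c.toNat - 32) ≤ 'Z' := (charLe_iff _ _).2 (by rw [ht]; show _ ≤ 90; omega)
    have hnu : ('A' ≤ c ∧ c ≤ 'Z') → False := by
      intro h; have := (charLe_iff _ _).1 h.1; have := (charLe_iff _ _).1 h.2
      revert this; show ¬ (c.toNat ≤ 90); omega
    have hcond : (decide ('a' ≤ c) && decide (c ≤ 'z')) = true := by
      simp [hl.1, hl.2]
    rw [if_pos hcond]
    have hcond2 : (decide ('A' ≤ Char.ofNat (c.toNat - 32)) && decide (Char.ofNat (c.toNat - 32) ≤ 'Z')) = true := by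
      simp [hA, hZ]
    have hcond3 : (decide ('A' ≤ c) && decide (c ≤ 'Z')) = false := by
      simp only [Bool.and_eq_false_iff, decide_eq_false_iff_not]
      by_cases hx : 'A' ≤ c
      · exact Or.inr (fun h => hnu ⟨hx, h⟩)
      · exact Or.inl hx
    rw [hcond2, if_pos rfl, hcond3, if_neg (by simp), ht]
    have : c.toNat - 32 + 32 = c.toNat := by omega
    rw [this, Char.ofNat_toNat]
  · have hcond : (decide ('a' ≤ c) && decide (c ≤ 'z')) = false := by
      simp only [Bool.and_eq_false_iff, decide_eq_false_iff_not]
      by_cases hx : 'a' ≤ c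
      · exact Or.inr (fun h => hl ⟨hx, h⟩)
      · exact Or.inl hx
    rw [hcond]; simp

theorem pvIsalpha_upperChar (c : Char) :
    PySem.Chars.isalpha (PySem.Chars.upperChar c) = PySem.Chars.isalpha c := by
  unfold PySem.Chars.isalpha PySem.Chars.upperChar PySem.Chars.islower PySem.Chars.isupper
  by_cases hl : 'a' ≤ c ∧ c ≤ 'z'
  · have h1 : 97 ≤ c.toNat := (charLe_iff _ _).1 hl.1
    have h2 : c.toNat ≤ 122 := (charLe_iff _ _).1 hl.2
    have ht : (Char.ofNat (c.toNat - 32)).toNat = c.toNat - 32 := toNat_ofNat_small _ (by omega)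
    have hA : 'A' ≤ Char.ofNat (c.toNat - 32) := (charLe_iff _ _).2 (by rw [ht]; show 65 ≤ _; omega)
    have hZ : Char.ofNat (c.toNat - 32) ≤ 'Z' := (charLe_iff _ _).2 (by rw [ht]; show _ ≤ 90; omega)
    have hcond : (decide ('a' ≤ c) && decide (c ≤ 'z')) = true := by simp [hl.1, hl.2]
    rw [if_pos hcond]
    simp [hA, hZ, hl.1, hl.2]
  · have hcond : (decide ('a' ≤ c) && decide (c ≤ 'z')) = false := by
      simp only [Bool.and_eq_false_iff, decide_eq_false_iff_not]
      by_cases hx : 'a' ≤ c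
      · exact Or.inr (fun h => hl ⟨hx, h⟩)
      · exact Or.inl hx
    rw [hcond]
    simp only [Bool.false_eq_true, if_false, Bool.or_false]
    simp only [Bool.and_eq_false_iff, decide_eq_false_iff_not] at hcond
    rcases hcond with h | h <;> simp [h]

theorem pvPascalA_toList (c : Char) (cs : List Char) (w : String) (hw : w.toList = c :: cs) :
    (pvPascalA w).toList = PySem.Chars.upperChar c :: PySem.Chars.lower cs := by
  simp [pvPascalA, PySem.Str.pyGet?, PySem.Str.slice, hw, PySem.Chars.upper, PySem.Chars.lower,
    PySem.List.slice_from_one, PySem.List.pyGet?, PySem.List.pyIdx?]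

theorem pvStr_ext {a b : String} (h : a.toList = b.toList) : a = b := by
  have := congrArg String.ofList h
  simpa using this

theorem pvNonempty_toList (w : String) (hw : w ≠ "") : ∃ c cs, w.toList = c :: cs := by
  cases h : w.toList with
  | nil => exact absurd (pvStr_ext (by simp [h])) hw
  | cons c cs => exact ⟨c, cs, rfl⟩

theorem pvFirstAlphaA_eq (w : String) (hw : w ≠ "") :
    PySem.Chars.isalpha ((PySem.Str.pyGet? (pvPascalA w) 0).getD ' ') = pvFirstAlphaW w := by
  obtain ⟨c, cs, hcs⟩ := pvNonempty_toList w hw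
  have hp := pvPascalA_toList c cs w hcs
  simp [pvFirstAlphaW, PySem.Str.pyGet?, hp, hcs, PySem.List.pyGet?, PySem.List.pyIdx?,
    pvIsalpha_upperChar]

theorem pvLowerFirst_pascal (w : String) (hw : w ≠ "") :
    pvLowerFirstA (pvPascalA w) = PySem.Str.lower w := by
  obtain ⟨c, cs, hcs⟩ := pvNonempty_toList w hw
  have hp := pvPascalA_toList c cs w hcs
  apply pvStr_ext
  simp [pvLowerFirstA, PySem.Str.pyGet?, PySem.Str.slice, hp, hcs,
    PySem.List.slice_from_one, PySem.List.pyGet?, PySem.List.pyIdx?,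
    PySem.Chars.lower, pvLowerChar_upperChar]

theorem pvConvertWordA_pascal (w : String) : pvConvertWordA w "pascal_case" = pvPascalB w := by
  unfold pvConvertWordA pvPascalA pvPascalB
  rw [if_neg (by decide), if_neg (by decide), if_pos rfl]

theorem pvCamelLoopA_true (words : List String) :
    pvCamelLoopA words true = words.map pvPascalB := by
  induction words with
  | nil => rfl
  | cons w ws ih => simp only [pvCamelLoopA, pvConvertWordA_pascal, Bool.not_true,
      Bool.false_and, if_neg (by decide : ¬(false = true)), List.map_cons, ih]

theorem pvCamelLoopA_false (words : List String) (hne : ∀ w ∈ words, w ≠ "") :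
    pvCamelLoopA words false =
      (match pvSplitAtAlpha words with
       | (_, none) => words.map pvPascalB
       | (pre, some (h, t)) => pre.map pvPascalB ++ [PySem.Str.lower h] ++ t.map pvPascalB) := by
  induction words with
  | nil => rfl
  | cons w ws ih =>
    have hw : w ≠ "" := hne w (by simp)
    have hcond : PySem.Chars.isalpha ((PySem.Str.pyGet? (pvConvertWordA w "pascal_case") 0).getD ' ')
        = pvFirstAlphaW w := by
      rw [pvConvertWordA_pascal]
      exact pvFirstAlphaA_eq w hw
    simp only [pvCamelLoopA, hcond, Bool.not_false, Bool.true_and, pvSplitAtAlpha]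
    by_cases h : pvFirstAlphaW w
    · rw [if_pos h, if_pos h, pvCamelLoopA_true, pvConvertWordA_pascal]
      show pvLowerFirstA (pvPascalA w) :: _ = _
      rw [pvLowerFirst_pascal w hw]
      simp
    · rw [if_neg (by simp [h]), if_neg (by simp [h])]
      rw [ih (fun x hx => hne x (by simp [hx])), pvConvertWordA_pascal]
      cases hs : pvSplitAtAlpha ws with
      | mk pre o =>
        cases o with
        | none => simp
        | some p => cases p with | mk hd tl => simp

-- ===== VERDICT (by name: the statement is the Claim_ definition above) =====
theorem convert_words_to_case_spec : Claim_equal_convert_words_to_case := by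
  unfold Claim_equal_convert_words_to_case
  intro words case _ hpre
  unfold Spec_convert_words_to_case convert_words_to_case convert_words_to_case_alt
  rcases hpre with (h | h) | ⟨h | h, hne⟩ <;> subst h
  · rw [if_neg (by decide), if_pos (Or.inl rfl), if_pos (Or.inl rfl)]
    exact List.map_congr_left (fun w _ => by
      unfold pvConvertWordA; rw [if_pos rfl, if_pos rfl])
  · rw [if_neg (by decide), if_pos (Or.inr (Or.inl rfl)), if_pos (Or.inr (Or.inl rfl))]
    exact List.map_congr_left (fun w _ => by
      unfold pvConvertWordA
      rw [if_neg (by decide), if_pos rfl, if_neg (by decide), if_pos rfl])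
  · rw [if_neg (by decide), if_pos (Or.inr (Or.inr rfl)), if_pos (Or.inr (Or.inr rfl))]
    exact List.map_congr_left (fun w _ => by
      rw [pvConvertWordA_pascal, if_neg (by decide), if_neg (by decide)])
  · rw [if_pos rfl, if_neg (by decide), if_pos rfl]
    exact pvCamelLoopA_false words hne
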